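-- pv_equiv track=rewrite | github.com/damianbrands/adventofcode | 2024/day04.py | search_mas
-- ===== SOURCE A (Python) =====
-- def search_mas(grid, word):
--     directions = {
--         "diagonal-up-left": (-1, -1),
--         "diagonal-up-right": (-1, 1),
--         "diagonal-down-left": (1, -1),
--         "diagonal-down-right": (1, 1)
--     }
--     locations = []
--     width = len(grid)
--     height = len(grid[0])
--
--     for x in range(width):
--         for y in range(height):
--             if grid[x][y] == word[0]:
--                 for dirX, dirY in directions.values():
--                     if find_word(grid, width, height, word, 0, x, y, dirX, dirY):
--                         locations.append([x + dirX, y + dirY])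
--     return locations
--
-- def find_word(grid, width, height, word, index, x, y, dirX, dirY):
--     if index == len(word):
--         return True
--
--     if is_valid(x, y, width, height) and word[index] == grid[x][y]:
--         return find_word(grid, width, height, word, index + 1, x + dirX, y + dirY, dirX, dirY)
--     return False
--
-- def is_valid(x, y, width, height):
--     return 0 <= x < width and 0 <= y < height
-- ===== SOURCE B (Python) =====
-- def search_mas(grid, word):
--     width = len(grid)
--     height = len(grid[0])
--     n = len(word)
--     dirs = ((-1, -1), (-1, 1), (1, -1), (1, 1))
--     locations = []
--     for x in range(width):
--         for y in range(height):
--             if grid[x][y] != word[0]: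
--                 continue
--             for dx, dy in dirs:
--                 if all(0 <= x + i * dx < width
--                        and 0 <= y + i * dy < height
--                        and grid[x + i * dx][y + i * dy] == word[i]
--                        for i in range(n)):
--                     locations.append([x + dx, y + dy])
--     return locations
-- ===== Notes on version B (the rewrite author's own statement) =====
-- stated objective: alternative
-- what changed: The recursive find_word walker is replaced by an inline closed-form matcher: for each direction, a single all(...) over i in range(len(word)) checks grid[x+i*dx][y+i*dy] against word[i] with explicit bounds tests, removing the helper recursion entirely.
import Mathlib
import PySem

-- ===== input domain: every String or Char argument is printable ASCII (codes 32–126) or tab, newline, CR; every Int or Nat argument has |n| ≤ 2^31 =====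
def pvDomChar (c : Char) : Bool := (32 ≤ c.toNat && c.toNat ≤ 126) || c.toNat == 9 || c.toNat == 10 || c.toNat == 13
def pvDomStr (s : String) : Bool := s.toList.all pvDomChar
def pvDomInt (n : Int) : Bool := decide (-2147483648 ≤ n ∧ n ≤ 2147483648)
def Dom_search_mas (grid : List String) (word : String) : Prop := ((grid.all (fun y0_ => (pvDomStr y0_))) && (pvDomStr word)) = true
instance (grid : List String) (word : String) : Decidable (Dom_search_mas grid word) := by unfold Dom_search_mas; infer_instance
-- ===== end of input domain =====

-- B replaces the recursive find_word helper by an inline all-over-range matcher per direction (alternative decomposition; return value only).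

-- shared Python-exact cell access: grid[x][y] (none = IndexError, excluded by Pre_)
def pyCell (grid : List String) (x y : Int) : Option Char :=
  (PySem.List.pyGet? grid x).bind fun r => PySem.Str.pyGet? r y

-- ===== PORT A =====
def is_valid (x y width height : Int) : Bool :=
  decide (0 ≤ x ∧ x < width ∧ 0 ≤ y ∧ y < height)

def find_word (grid : List String) (width height : Int) (word : String) (index : Nat)
    (x y dirX dirY : Int) : Bool :=
  if index = word.length then true
  else if word.length < index then false   -- totality guard only; unreachable from index ≤ len(word)
  else if is_valid x y width height && (PySem.Str.pyGet? word (index : Int) == pyCell grid x y) then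
    find_word grid width height word (index + 1) (x + dirX) (y + dirY) dirX dirY
  else false
termination_by word.length - index

def search_mas (grid : List String) (word : String) : List (List Int) :=
  let directions : List (Int × Int) := [(-1, -1), (-1, 1), (1, -1), (1, 1)]
  let width := grid.length
  let height := (grid.headI).length
  (List.range width).foldl (fun locs x =>
    (List.range height).foldl (fun locs y =>
      if pyCell grid (x : Int) (y : Int) == PySem.Str.pyGet? word 0 then
        directions.foldl (fun locs d =>
          if find_word grid (width : Int) (height : Int) word 0 (x : Int) (y : Int) d.1 d.2 then
            locs ++ [[(x : Int) + d.1, (y : Int) + d.2]]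
          else locs) locs
      else locs) locs) []

-- ===== PORT B =====
def search_mas_alt (grid : List String) (word : String) : List (List Int) :=
  let width := grid.length
  let height := (grid.headI).length
  let n := word.length
  let dirs : List (Int × Int) := [(-1, -1), (-1, 1), (1, -1), (1, 1)]
  (List.range width).foldl (fun locs x =>
    (List.range height).foldl (fun locs y =>
      if pyCell grid (x : Int) (y : Int) != PySem.Str.pyGet? word 0 then locs
      else
        dirs.foldl (fun locs d =>
          if (List.range n).all (fun i =>
               decide (0 ≤ (x : Int) + i * d.1 ∧ (x : Int) + i * d.1 < (width : Int) ∧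
                       0 ≤ (y : Int) + i * d.2 ∧ (y : Int) + i * d.2 < (height : Int)) &&
               (pyCell grid ((x : Int) + i * d.1) ((y : Int) + i * d.2)
                  == PySem.Str.pyGet? word (i : Int))) then
            locs ++ [[(x : Int) + d.1, (y : Int) + d.2]]
          else locs) locs) locs) []

-- ===== PRECONDITION & SPEC =====
-- Pre_ excludes exactly the inputs where Python A raises an IndexError: empty grid (grid[0]), and,
-- when the first row is nonempty, an empty word (word[0]) or a row shorter than len(grid[0]).
def Pre_search_mas (grid : List String) (word : String) : Prop :=
  grid ≠ [] ∧ ((grid.headI).length = 0 ∨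
    (word ≠ "" ∧ ∀ r ∈ grid, (grid.headI).length ≤ r.length))
instance (grid : List String) (word : String) : Decidable (Pre_search_mas grid word) := by
  unfold Pre_search_mas; infer_instance

def pvWitness_search_mas : List String × String := (["MAS", "AAA", "SAM"], "MAS")

def Spec_search_mas (grid : List String) (word : String) (out : List (List Int)) : Prop := out = search_mas_alt grid word
instance (grid : List String) (word : String) (out : List (List Int)) : Decidable (Spec_search_mas grid word out) := by unfold Spec_search_mas; infer_instance

-- ===== CLAIM (what is proved, stated in full; the proofs are below) =====
def Claim_equal_search_mas : Prop := ∀ (grid : List String) (word : String), Dom_search_mas grid word → Pre_search_mas grid word → Spec_search_mas grid word (search_mas grid word)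

-- ===== LEMMAS AND PROOFS =====

-- A's recursive walker, expressed as an 'all' over the remaining offsets
lemma find_word_eq_all (grid : List String) (width height : Int) (word : String)
    (dx dy : Int) : ∀ (m index : Nat) (x y : Int), index + m = word.length →
    find_word grid width height word index x y dx dy
      = (List.range m).all (fun i =>
          is_valid (x + i * dx) (y + i * dy) width height &&
          (PySem.Str.pyGet? word ((index + i : Nat) : Int) == pyCell grid (x + i * dx) (y + i * dy))) := by
  intro m
  induction m with
  | zero =>
    intro index x y h
    simp only [Nat.add_zero] at h
    rw [find_word]
    simp [h]
  | succ m ih =>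
    intro index x y h
    rw [find_word]
    have h1 : ¬ index = word.length := by omega
    have h2 : ¬ word.length < index := by omega
    rw [List.range_succ_eq_map]
    simp only [h1, h2, if_false, List.all_cons, List.all_map]
    by_cases hc : (is_valid x y width height && (PySem.Str.pyGet? word (index : Int) == pyCell grid x y)) = true
    · rw [if_pos hc]
      rw [ih (index + 1) (x + dx) (y + dy) (by omega)]
      have hfirst : (is_valid (x + (0 : Nat) * dx) (y + (0 : Nat) * dy) width height &&
          (PySem.Str.pyGet? word ((index + 0 : Nat) : Int) == pyCell grid (x + (0 : Nat) * dx) (y + (0 : Nat) * dy))) = true := by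
        simpa using hc
      rw [hfirst, Bool.true_and]
      congr 1
      funext i
      simp only [Function.comp]
      have e1 : ((index + 1 + i : Nat) : Int) = ((index + (i + 1) : Nat) : Int) := by push_cast; ring
      have e2 : x + dx + (i : Int) * dx = x + ((i : Int) + 1) * dx := by ring
      have e3 : y + dy + (i : Int) * dy = y + ((i : Int) + 1) * dy := by ring
      rw [e1, e2, e3]
      push_cast
      ring_nf
    · rw [if_neg hc]
      have hfirst : (is_valid (x + (0 : Nat) * dx) (y + (0 : Nat) * dy) width height &&
          (PySem.Str.pyGet? word ((index + 0 : Nat) : Int) == pyCell grid (x + (0 : Nat) * dx) (y + (0 : Nat) * dy))) = false := by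
        simpa using (Bool.eq_false_iff.mpr hc)
      rw [hfirst]
      simp

-- the per-direction conditions of the two ports coincide
lemma cond_eq (grid : List String) (word : String) (x y : Int) (d : Int × Int) :
    find_word grid (grid.length : Int) ((grid.headI).length : Int) word 0 x y d.1 d.2
      = (List.range word.length).all (fun i =>
          decide (0 ≤ x + i * d.1 ∧ x + i * d.1 < (grid.length : Int) ∧
                  0 ≤ y + i * d.2 ∧ y + i * d.2 < ((grid.headI).length : Int)) &&
          (pyCell grid (x + i * d.1) (y + i * d.2)
             == PySem.Str.pyGet? word (i : Int))) := by
  rw [find_word_eq_all grid _ _ word d.1 d.2 word.length 0 x y (by omega)]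
  congr 1
  funext i
  simp only [is_valid, Nat.zero_add]
  congr 1
  exact Bool.beq_comm

-- ===== VERDICT (by name: the statement is the Claim_ definition above) =====
theorem search_mas_spec : Claim_equal_search_mas := by
  intro grid word _ _
  unfold Spec_search_mas search_mas search_mas_alt
  simp only []
  congr 1
  funext locs x
  congr 1
  funext locs y
  by_cases hg : (pyCell grid (x : Int) (y : Int) == PySem.Str.pyGet? word 0) = true
  · rw [if_pos hg, if_neg (by simp only [bne, hg, Bool.not_true]; exact Bool.false_ne_true)]
    congr 1
    funext locs d
    rw [cond_eq]
  · have h' : (pyCell grid (x : Int) (y : Int) == PySem.Str.pyGet? word 0) = false :=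
      Bool.eq_false_iff.mpr hg
    simp only [h', bne, Bool.not_false, Bool.false_eq_true, if_false, if_true]
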